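-- pv_equiv track=rewrite | github.com/choijunho-AIDeveloper/Basic-Algorithm | SolveProgrammers/Level2/귤_고르기.py | solution
-- ===== SOURCE A (Python) =====
-- def solution(k, tangerine):
--     from collections import defaultdict
--     gulDict = defaultdict(int)
--     for ele in tangerine:
--         gulDict[ele] += 1
--     gul = sorted(gulDict.items(), key = lambda x: x[1], reverse = True)
--     answer = 0
--     s = 0
--     for g in gul:
--         if s >= k:
--             break
--         else:
--             answer += 1
--             s += g[1]
--     return answer
-- ===== SOURCE B (Python) =====
-- def solution(k, tangerine):
--     # Bucket the kind-frequencies and sweep the possible counts in descending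
--     # order, taking each whole bucket at once with a ceiling division.
--     freq = {}
--     for t in tangerine:
--         freq[t] = freq.get(t, 0) + 1
--     if not freq:
--         return 0
--     bucket = {}
--     for c in freq.values():
--         bucket[c] = bucket.get(c, 0) + 1
--     answer = 0
--     remaining = k
--     for c in range(max(bucket), 0, -1):
--         if remaining <= 0:
--             break
--         take = min(bucket.get(c, 0), -(-remaining // c))
--         answer += take
--         remaining -= take * c
--     return answer
-- ===== Notes on version B (the rewrite author's own statement) =====
-- stated objective: alternative
-- what changed: Instead of sorting the (kind,count) pairs by count and walking them one kind at a time, B buckets the frequencies (count of counts) and sweeps the possible counts once in descending order, taking whole buckets at once with a ceiling division.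
import Mathlib
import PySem

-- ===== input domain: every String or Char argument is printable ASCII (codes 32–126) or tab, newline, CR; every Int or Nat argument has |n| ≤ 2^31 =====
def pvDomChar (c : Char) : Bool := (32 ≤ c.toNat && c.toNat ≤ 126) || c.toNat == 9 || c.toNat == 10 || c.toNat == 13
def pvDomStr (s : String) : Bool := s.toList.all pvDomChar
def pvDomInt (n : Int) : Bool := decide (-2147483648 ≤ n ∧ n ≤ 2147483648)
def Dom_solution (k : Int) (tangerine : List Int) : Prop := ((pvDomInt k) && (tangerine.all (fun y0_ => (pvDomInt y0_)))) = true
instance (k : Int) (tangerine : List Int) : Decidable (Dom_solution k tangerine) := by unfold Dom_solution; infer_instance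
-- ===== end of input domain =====

-- B replaces sort-the-kinds-by-count with a frequency bucket (count of counts) swept
-- once in descending order, taking whole buckets arithmetically (objective: alternative).


-- ===== PORT A =====
-- 'for g in gul: if s >= k: break; else: answer += 1; s += g[1]'
def solveGulLoop (k : Int) : List (Int × Int) → Int → Int → Int
  | [], answer, _ => answer
  | g :: rest, answer, s =>
    if s ≥ k then answer else solveGulLoop k rest (answer + 1) (s + g.2)

def solution (k : Int) (tangerine : List Int) : Int :=
  let gulDict := tangerine.foldl (fun d ele => d.modify ele 0 (· + 1)) PySem.Dict.empty
  let gul := PySem.List.sorted gulDict.items (fun x => x.2) true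
  solveGulLoop k gul 0 0

-- ===== PORT B =====
-- 'for c in range(max(bucket), 0, -1): if remaining <= 0: break; take = ...; ...'
def bucketLoop (bucket : PySem.Dict Int Int) : List Int → Int → Int → Int
  | [], answer, _ => answer
  | c :: rest, answer, remaining =>
    if remaining ≤ 0 then answer
    else
      let take := min (bucket.getD c 0) (-(PySem.Int.floordiv (-remaining) c))
      bucketLoop bucket rest (answer + take) (remaining - take * c)

def solution_alt (k : Int) (tangerine : List Int) : Int :=
  let freq := tangerine.foldl (fun d t => d.insert t (d.getD t 0 + 1)) PySem.Dict.empty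
  if freq.items = [] then 0
  else
    let bucket := freq.values.foldl (fun d c => d.insert c (d.getD c 0 + 1)) PySem.Dict.empty
    let maxc := (PySem.List.max? bucket.keys (fun x => x)).getD 0
    bucketLoop bucket (PySem.List.pyRange maxc 0 (-1)) 0 k

-- ===== PRECONDITION & SPEC =====
def Spec_solution (k : Int) (tangerine : List Int) (out : Int) : Prop := out = solution_alt k tangerine
instance (k : Int) (tangerine : List Int) (out : Int) : Decidable (Spec_solution k tangerine out) := by unfold Spec_solution; infer_instance

-- ===== CLAIM (what is proved, stated in full; the proofs are below) =====
def Claim_equal_solution : Prop := ∀ (k : Int) (tangerine : List Int), Dom_solution k tangerine → Spec_solution k tangerine (solution k tangerine)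

-- ===== LEMMAS AND PROOFS =====

-- The common greedy skeleton, over the bare list of counts, with 'remaining = k - s'.
def greedyR : List Int → Int → Int → Int
  | [], a, _ => a
  | c :: t, a, r => if r ≤ 0 then a else greedyR t (a + 1) (r - c)

theorem greedyR_nonpos (l : List Int) (a r : Int) (h : r ≤ 0) : greedyR l a r = a := by
  cases l <;> simp [greedyR, h]

theorem solveGulLoop_eq_greedyR (k : Int) (l : List (Int × Int)) (a s : Int) :
    solveGulLoop k l a s = greedyR (l.map (·.2)) a (k - s) := by
  induction l generalizing a s with
  | nil => simp [solveGulLoop, greedyR]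
  | cons g t ih =>
    simp only [solveGulLoop, List.map, greedyR]
    by_cases h : s ≥ k
    · rw [if_pos h, if_pos (by omega)]
    · rw [if_neg h, if_neg (by omega), ih]
      congr 1
      omega

-- ceiling division -((-r) // c) for 0 < c : its defining bracket
theorem ceil_bracket {r c : Int} (hc : 0 < c) :
    (-(PySem.Int.floordiv (-r) c) - 1) * c < r ∧ r ≤ -(PySem.Int.floordiv (-r) c) * c :=
  (PySem.Int.neg_floordiv_neg_eq_iff_of_pos hc).mp rfl

theorem ceil_one {r c : Int} (hc : 0 < c) (h1 : 0 < r) (h2 : r ≤ c) :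
    -(PySem.Int.floordiv (-r) c) = 1 := by
  rw [PySem.Int.neg_floordiv_neg_eq_iff_of_pos hc]
  constructor <;> nlinarith

theorem ceil_sub {r c : Int} (hc : 0 < c) :
    -(PySem.Int.floordiv (-r) c) = -(PySem.Int.floordiv (-(r - c)) c) + 1 := by
  rw [PySem.Int.floordiv_eq_ediv_of_pos hc, PySem.Int.floordiv_eq_ediv_of_pos hc]
  have h : -(r - c) = -r + 1 * c := by ring
  rw [h, Int.add_mul_ediv_right _ _ (by omega : c ≠ 0)]
  ring

theorem ceil_pos {r c : Int} (hc : 0 < c) (hr : 0 < r) :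
    1 ≤ -(PySem.Int.floordiv (-r) c) := by
  obtain ⟨h1, h2⟩ := ceil_bracket (r := r) hc
  nlinarith

-- one bucket step: the arithmetic 'take' equals walking 'm' copies of 'c' one by one
theorem greedyR_replicate (c : Int) (hc : 1 ≤ c) :
    ∀ (m : Nat) (rest : List Int) (a r : Int),
      greedyR (List.replicate m c ++ rest) a r =
        if r ≤ 0 then a
        else
          greedyR rest (a + min (m : Int) (-(PySem.Int.floordiv (-r) c)))
            (r - min (m : Int) (-(PySem.Int.floordiv (-r) c)) * c) := by
  intro m
  induction m with
  | zero =>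
    intro rest a r
    by_cases h : r ≤ 0
    · simp [greedyR_nonpos _ _ _ h, h]
    · have hceil := ceil_pos (by omega : (0:Int) < c) (by omega : (0:Int) < r)
      have hmin : min ((0:Nat) : Int) (-(PySem.Int.floordiv (-r) c)) = 0 := by
        simp only [Nat.cast_zero]
        omega
      simp only [List.replicate, List.nil_append, hmin, if_neg h, add_zero, zero_mul, sub_zero]
  | succ m ih =>
    intro rest a r
    by_cases h : r ≤ 0
    · simp [List.replicate_succ, greedyR, h]
    · rw [if_neg h]
      have hc0 : (0:Int) < c := by omega
      rw [List.replicate_succ, List.cons_append]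
      simp only [greedyR, if_neg h]
      by_cases h2 : r - c ≤ 0
      · rw [greedyR_nonpos _ _ _ h2]
        have hceil : -(PySem.Int.floordiv (-r) c) = 1 := ceil_one hc0 (by omega) (by omega)
        have hmin : min ((m + 1 : Nat) : Int) (-(PySem.Int.floordiv (-r) c)) = 1 := by
          rw [hceil]; push_cast; omega
        rw [hmin, greedyR_nonpos _ _ _ (by omega : r - 1 * c ≤ 0)]
      · rw [ih rest (a + 1) (r - c), if_neg h2]
        have hsub := ceil_sub (r := r) hc0
        have hge : 1 ≤ -(PySem.Int.floordiv (-(r - c)) c) := ceil_pos hc0 (by omega)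
        have hmin : min ((m + 1 : Nat) : Int) (-(PySem.Int.floordiv (-r) c)) =
            min (m : Int) (-(PySem.Int.floordiv (-(r - c)) c)) + 1 := by
          rw [hsub]; push_cast; omega
        rw [hmin]
        congr 1
        · ring
        · ring

-- the whole B loop equals the greedy walk over the expansion of the buckets
theorem bucketLoop_eq_greedyR (B : PySem.Dict Int Int) (hB : ∀ c, 0 ≤ B.getD c 0) :
    ∀ (cs : List Int), (∀ c ∈ cs, 1 ≤ c) → ∀ (a r : Int),
      bucketLoop B cs a r =
        greedyR (cs.flatMap (fun c => List.replicate (B.getD c 0).toNat c)) a r := by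
  intro cs
  induction cs with
  | nil => intro _ a r; simp [bucketLoop, greedyR]
  | cons c t ih =>
    intro hpos a r
    have hc : 1 ≤ c := hpos c (by simp)
    by_cases h : r ≤ 0
    · rw [List.flatMap_cons, greedyR_nonpos _ _ _ h]
      simp [bucketLoop, h]
    · rw [List.flatMap_cons, greedyR_replicate c hc _ _ a r, if_neg h]
      have hcast : (((B.getD c 0).toNat : Int)) = B.getD c 0 := Int.toNat_of_nonneg (hB c)
      simp only [bucketLoop, if_neg h, hcast]
      exact ih (fun x hx => hpos x (by simp [hx])) _ _

-- counting a flatMap of replicate blocks over a Nodup index list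
theorem count_flatMap_replicate (g : Int → Nat) (v : Int) :
    ∀ (cs : List Int), cs.Nodup →
      (cs.flatMap (fun c => List.replicate (g c) c)).count v =
        if v ∈ cs then g v else 0 := by
  intro cs
  induction cs with
  | nil => simp
  | cons c t ih =>
    intro hnd
    rw [List.flatMap_cons, List.count_append, List.count_replicate,
      ih (List.Nodup.of_cons hnd)]
    by_cases hvc : v = c
    · subst hvc
      have hv : v ∉ t := (List.nodup_cons.mp hnd).1
      simp [hv]
    · simp [hvc, Ne.symm hvc]

theorem pairwise_ge_pyRange_desc (a : Int) :
    (PySem.List.pyRange a 0 (-1)).Pairwise (fun x y : Int => y ≤ x) := by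
  rw [PySem.List.pyRange_neg_one_eq_reverse, List.pairwise_reverse]
  exact (PySem.List.pairwise_lt_pyRange_one _ _).imp (fun h => le_of_lt h)

theorem nodup_pyRange_desc (a : Int) : (PySem.List.pyRange a 0 (-1)).Nodup := by
  rw [PySem.List.pyRange_neg_one_eq_reverse, List.nodup_reverse]
  exact PySem.List.nodup_pyRange_one _ _

-- Pairwise (≥) survives expansion into replicate blocks
theorem pairwise_ge_flatMap_replicate (g : Int → Nat) (cs : List Int)
    (h : cs.Pairwise (fun x y : Int => y ≤ x)) :
    (cs.flatMap (fun c => List.replicate (g c) c)).Pairwise (fun x y : Int => y ≤ x) := by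
  induction cs with
  | nil => simp
  | cons c t ih =>
    rw [List.flatMap_cons, List.pairwise_append]
    refine ⟨List.pairwise_replicate.mpr (Or.inr le_rfl), ih h.of_cons, ?_⟩
    intro x hx y hy
    obtain ⟨c', hc', hyc'⟩ := List.mem_flatMap.mp hy
    rw [List.eq_of_mem_replicate hx, List.eq_of_mem_replicate hyc']
    exact (List.pairwise_cons.mp h).1 c' hc'

-- a nonincreasing list is determined by its multiset
theorem list_eq_of_sorted_desc {L1 L2 : List Int}
    (hp1 : L1.Pairwise (fun x y : Int => y ≤ x))
    (hp2 : L2.Pairwise (fun x y : Int => y ≤ x))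
    (hperm : L1.Perm L2) : L1 = L2 :=
  List.eq_of_perm_of_sorted (fun _ _ _ _ h1 h2 => le_antisymm h2 h1) hp1 hp2 hperm

-- the bucket expansion is a permutation of the values list
theorem expansion_perm (vals : List Int) (maxc : Int)
    (hv : ∀ v ∈ vals, 1 ≤ v ∧ v ≤ maxc) :
    ((PySem.List.pyRange maxc 0 (-1)).flatMap
        (fun c => List.replicate (vals.count c) c)).Perm vals := by
  rw [List.perm_iff_count]
  intro v
  rw [count_flatMap_replicate (fun c => vals.count c) v _ (nodup_pyRange_desc maxc)]
  by_cases hm : v ∈ PySem.List.pyRange maxc 0 (-1)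
  · simp [hm]
  · rw [if_neg hm, Eq.comm, List.count_eq_zero]
    intro hvv
    obtain ⟨h1, h2⟩ := hv v hvv
    exact hm (PySem.List.mem_pyRange_neg_one.mpr ⟨by omega, h2⟩)

-- ===== VERDICT (by name: the statement is the Claim_ definition above) =====
-- assembling the A side into greedyR form
theorem solution_eq_greedyR (k : Int) (xs : List Int) :
    solution k xs =
      greedyR ((PySem.List.sorted (PySem.Dict.counter xs).items
        (fun x => x.2) true).map (·.2)) 0 k := by
  simp only [solution, ← PySem.Dict.counter_eq_foldl, solveGulLoop_eq_greedyR, sub_zero]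

theorem main_eq (k : Int) (xs : List Int) : solution k xs = solution_alt k xs := by
  cases xs with
  | nil => rfl
  | cons x xt =>
    have hxmem : x ∈ PySem.Set.ofList (x :: xt) :=
      (PySem.Set.mem_ofList (x :: xt) x).mpr (by simp)
    have hSne : PySem.Set.ofList (x :: xt) ≠ [] := by
      intro h; rw [h] at hxmem; simp at hxmem
    have hitems : (PySem.Dict.counter (x :: xt)).items =
        (PySem.Set.ofList (x :: xt)).map (fun c => (c, (((x :: xt).count c : Int)))) :=
      PySem.Dict.items_counter (x :: xt)
    have hine : (PySem.Dict.counter (x :: xt)).items ≠ [] := by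
      rw [hitems]
      simpa using hSne
    have hvals : (PySem.Dict.counter (x :: xt)).values =
        (PySem.Dict.counter (x :: xt)).items.map (·.2) := rfl
    simp only [solution_alt, PySem.Dict.foldl_insert_getD_add_one_eq_counter,
      PySem.Dict.keys_counter]
    rw [if_neg hine, solution_eq_greedyR]
    -- abbreviations
    generalize hvdef : (PySem.Dict.counter (x :: xt)).values = vals at *
    generalize hmdef : (PySem.List.max? (PySem.Set.ofList vals) (fun x => x)).getD 0 = maxc
    -- every count is between 1 and maxc
    have hv : ∀ v ∈ vals, 1 ≤ v ∧ v ≤ maxc := by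
      intro v hvv
      constructor
      · rw [hvals, hitems, List.map_map] at hvv
        obtain ⟨c, hc, hcv⟩ := List.mem_map.mp hvv
        have hcx : c ∈ (x :: xt) := (PySem.Set.mem_ofList _ _).mp hc
        have hcnt : 1 ≤ (x :: xt).count c := List.count_pos_iff.mpr hcx
        simp only [Function.comp] at hcv
        rw [← hcv]
        exact_mod_cast hcnt
      · have hmem : v ∈ PySem.Set.ofList vals := (PySem.Set.mem_ofList _ _).mpr hvv
        cases heq : PySem.List.max? (PySem.Set.ofList vals) (fun x => x) with
        | none =>
          rw [(PySem.List.max?_eq_none_iff _ _).mp heq] at hmem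
          simp at hmem
        | some m =>
          have hle := PySem.List.max?_isMax heq v hmem
          rw [heq] at hmdef
          simpa [← hmdef] using hle
    -- expand the B loop
    have hB : ∀ c, 0 ≤ (PySem.Dict.counter vals).getD c 0 := by
      intro c
      rw [PySem.Dict.getD_counter]
      exact Int.natCast_nonneg _
    rw [bucketLoop_eq_greedyR _ hB _
      (fun c hcm => by
        have := PySem.List.mem_pyRange_neg_one.mp hcm
        omega)]
    congr 1
    have hg : (fun c => List.replicate ((PySem.Dict.counter vals).getD c 0).toNat c) =
        (fun c => List.replicate (vals.count c) c) := by
      funext c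
      rw [PySem.Dict.getD_counter, Int.toNat_natCast]
    rw [hg]
    apply list_eq_of_sorted_desc
    · exact List.pairwise_map.mpr (PySem.List.sorted_pairwise_rev _ _)
    · exact pairwise_ge_flatMap_replicate _ _ (pairwise_ge_pyRange_desc maxc)
    · have p1 : ((PySem.List.sorted (PySem.Dict.counter (x :: xt)).items
          (fun x => x.2) true).map (·.2)).Perm vals := by
        rw [hvals]
        exact List.Perm.map (fun p : Int × Int => p.2) (PySem.List.sorted_perm _ _ _)
      exact p1.trans (expansion_perm vals maxc hv).symm

theorem solution_spec : Claim_equal_solution := by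
  unfold Claim_equal_solution
  intro k tangerine _
  unfold Spec_solution
  exact main_eq k tangerine
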